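-- pv_equiv track=rewrite | github.com/MeKhani/modelGraph | tool.py | exrtract_relation_in_types_entities
-- ===== SOURCE A (Python) =====
-- def exrtract_relation_in_types_entities(triple_entities, en_dic_id):
--     inner_relations_for_every_type = {}
--     outer_recived_relations_for_every_type = {}
--     outer_sent_relations_for_every_type = {}
--
--     for key, val in en_dic_id.items():
--         for en in val:
--             # Collect unique relations where `en` is a subject or object
--             inner_relations_subject = {relation for subj, relation, obj in triple_entities if subj == en and obj in val}
--             outer_relations_subject = {relation for subj, relation, obj in triple_entities if subj == en and obj not in  val}
--             # objects_en = {obj for subj, relation, obj in triple_entities if subj == en and obj not in  val}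
--             inner_relations_object =  {relation for subj, relation, obj in triple_entities if obj == en and subj in val}
--             outer_relations_object =  {relation for subj, relation, obj in triple_entities if obj == en and subj not in val}
--             # subject_en =  {subj for subj, relation, obj in triple_entities if obj == en and subj not in val}
--
--
--             # Update received relations dictionary
--             if inner_relations_subject:
--                 if key not in inner_relations_for_every_type:
--                     inner_relations_for_every_type[key] = inner_relations_subject
--                 else:
--                     inner_relations_for_every_type[key].update(inner_relations_subject)
--             if outer_relations_subject:
--                 if key not in outer_recived_relations_for_every_type:
--                     outer_recived_relations_for_every_type[key] = outer_relations_subject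
--                 else:
--                     outer_recived_relations_for_every_type[key].update(outer_relations_subject)
--
--             # Update sent relations dictionary
--             if inner_relations_object:
--                 if key not in inner_relations_for_every_type:
--                     inner_relations_for_every_type[key] = inner_relations_object
--                 else:
--                     inner_relations_for_every_type[key].update(inner_relations_object)
--             if outer_relations_object:
--                 if key not in outer_sent_relations_for_every_type:
--                     outer_sent_relations_for_every_type[key] = outer_relations_object
--                 else:
--                     outer_sent_relations_for_every_type[key].update(outer_relations_object)
--
--
--     return inner_relations_for_every_type,outer_recived_relations_for_every_type,outer_sent_relations_for_every_type
-- ===== SOURCE B (Python) =====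
-- def exrtract_relation_in_types_entities(triple_entities, en_dic_id):
--     # Index triples by subject and by object once, then visit only incident triples per entity.
--     subj_idx = {}
--     obj_idx = {}
--     for s, r, o in triple_entities:
--         subj_idx.setdefault(s, []).append((r, o))
--         obj_idx.setdefault(o, []).append((r, s))
--     inner = {}
--     outer_recv = {}
--     outer_sent = {}
--     for key, val in en_dic_id.items():
--         vs = set(val)
--         for en in val:
--             for r, o in subj_idx.get(en, []):
--                 d = inner if o in vs else outer_recv
--                 d.setdefault(key, set()).add(r)
--             for r, s in obj_idx.get(en, []):
--                 d = inner if s in vs else outer_sent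
--                 d.setdefault(key, set()).add(r)
--     return inner, outer_recv, outer_sent
-- ===== Notes on version B (the rewrite author's own statement) =====
-- stated objective: faster
-- what changed: B builds subject/object incidence indexes over the triples once and, per entity, visits only its incident triples while accumulating the relation sets, instead of A's four full scans of the triple list for every entity of every type.
import Mathlib
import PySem

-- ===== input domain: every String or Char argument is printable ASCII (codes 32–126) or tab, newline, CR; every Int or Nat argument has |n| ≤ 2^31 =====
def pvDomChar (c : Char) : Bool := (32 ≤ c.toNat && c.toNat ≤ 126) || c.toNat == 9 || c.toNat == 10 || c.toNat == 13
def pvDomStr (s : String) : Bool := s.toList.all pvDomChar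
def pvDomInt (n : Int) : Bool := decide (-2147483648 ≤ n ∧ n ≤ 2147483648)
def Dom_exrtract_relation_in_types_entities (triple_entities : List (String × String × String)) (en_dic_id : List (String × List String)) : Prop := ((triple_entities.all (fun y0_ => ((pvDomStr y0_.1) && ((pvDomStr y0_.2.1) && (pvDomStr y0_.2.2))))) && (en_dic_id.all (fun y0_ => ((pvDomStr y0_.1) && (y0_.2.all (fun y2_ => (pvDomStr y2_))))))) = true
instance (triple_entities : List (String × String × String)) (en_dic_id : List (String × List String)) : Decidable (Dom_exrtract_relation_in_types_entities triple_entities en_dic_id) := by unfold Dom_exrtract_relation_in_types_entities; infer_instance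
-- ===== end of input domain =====

-- B indexes the triples by subject and by object once and visits only the incident triples of each
-- entity, instead of A's four full scans of triple_entities per entity (alternative algorithm, faster
-- in a timing run's measurement on the generated inputs).

-- ===== PORT A =====

-- A's dict-update block: 'if S: (d[key] = S) if key not in d else d[key].update(S)'
def pvAUpd (d : PySem.Dict String (PySem.Set String)) (key : String) (S : PySem.Set String) :
    PySem.Dict String (PySem.Set String) :=
  if S.isEmpty then d
  else
    match d.get? key with
    | none => d.insert key S
    | some s => d.insert key (PySem.Set.update s S)

-- the body of A's inner 'for en in val' loop (state = the three dicts)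
def pvA_en (te : List (String × String × String)) (key : String) (val : List String)
    (st : PySem.Dict String (PySem.Set String) × PySem.Dict String (PySem.Set String) × PySem.Dict String (PySem.Set String))
    (en : String) :
    PySem.Dict String (PySem.Set String) × PySem.Dict String (PySem.Set String) × PySem.Dict String (PySem.Set String) :=
  let innerSub := PySem.Set.ofList ((te.filter (fun t => t.1 == en && val.contains t.2.2)).map (fun t => t.2.1))
  let outerSub := PySem.Set.ofList ((te.filter (fun t => t.1 == en && !val.contains t.2.2)).map (fun t => t.2.1))
  let innerObj := PySem.Set.ofList ((te.filter (fun t => t.2.2 == en && val.contains t.1)).map (fun t => t.2.1))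
  let outerObj := PySem.Set.ofList ((te.filter (fun t => t.2.2 == en && !val.contains t.1)).map (fun t => t.2.1))
  let inner := pvAUpd st.1 key innerSub
  let outr := pvAUpd st.2.1 key outerSub
  let inner := pvAUpd inner key innerObj
  let outs := pvAUpd st.2.2 key outerObj
  (inner, outr, outs)

-- the body of A's outer 'for key, val in en_dic_id.items()' loop
def pvA_key (te : List (String × String × String))
    (st : PySem.Dict String (PySem.Set String) × PySem.Dict String (PySem.Set String) × PySem.Dict String (PySem.Set String))
    (kv : String × List String) :
    PySem.Dict String (PySem.Set String) × PySem.Dict String (PySem.Set String) × PySem.Dict String (PySem.Set String) :=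
  kv.2.foldl (pvA_en te kv.1 kv.2) st

def exrtract_relation_in_types_entities (triple_entities : List (String × String × String)) (en_dic_id : List (String × List String)) : (List (String × List String)) × (List (String × List String)) × (List (String × List String)) :=
  let res := en_dic_id.foldl (pvA_key triple_entities) (PySem.Dict.empty, PySem.Dict.empty, PySem.Dict.empty)
  (res.1.items, res.2.1.items, res.2.2.items)

-- ===== PORT B =====

-- 'subj_idx.setdefault(s, []).append((r, o)); obj_idx.setdefault(o, []).append((r, s))'
def pvAddIncident
    (p : PySem.Dict String (List (String × String)) × PySem.Dict String (List (String × String)))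
    (t : String × String × String) :
    PySem.Dict String (List (String × String)) × PySem.Dict String (List (String × String)) :=
  (PySem.Dict.modify p.1 t.1 [] (fun l => l ++ [(t.2.1, t.2.2)]),
   PySem.Dict.modify p.2 t.2.2 [] (fun l => l ++ [(t.2.1, t.1)]))

-- 'd.setdefault(key, set()).add(r)'
def pvBAdd (d : PySem.Dict String (PySem.Set String)) (key r : String) :
    PySem.Dict String (PySem.Set String) :=
  PySem.Dict.modify d key [] (fun s => PySem.Set.add s r)

-- the body of B's inner 'for en in val' loop: walk only the incident triples of en
def pvB_en (idx : PySem.Dict String (List (String × String)) × PySem.Dict String (List (String × String)))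
    (key : String) (vs : PySem.Set String)
    (st : PySem.Dict String (PySem.Set String) × PySem.Dict String (PySem.Set String) × PySem.Dict String (PySem.Set String))
    (en : String) :
    PySem.Dict String (PySem.Set String) × PySem.Dict String (PySem.Set String) × PySem.Dict String (PySem.Set String) :=
  let st1 := (idx.1.getD en []).foldl
    (fun st ro => if vs.contains ro.2 then (pvBAdd st.1 key ro.1, st.2.1, st.2.2)
                  else (st.1, pvBAdd st.2.1 key ro.1, st.2.2)) st
  (idx.2.getD en []).foldl
    (fun st rs => if vs.contains rs.2 then (pvBAdd st.1 key rs.1, st.2.1, st.2.2)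
                  else (st.1, st.2.1, pvBAdd st.2.2 key rs.1)) st1

def pvB_key (idx : PySem.Dict String (List (String × String)) × PySem.Dict String (List (String × String)))
    (st : PySem.Dict String (PySem.Set String) × PySem.Dict String (PySem.Set String) × PySem.Dict String (PySem.Set String))
    (kv : String × List String) :
    PySem.Dict String (PySem.Set String) × PySem.Dict String (PySem.Set String) × PySem.Dict String (PySem.Set String) :=
  kv.2.foldl (pvB_en idx kv.1 (PySem.Set.ofList kv.2)) st

def exrtract_relation_in_types_entities_alt (triple_entities : List (String × String × String)) (en_dic_id : List (String × List String)) : (List (String × List String)) × (List (String × List String)) × (List (String × List String)) :=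
  let idx := triple_entities.foldl pvAddIncident (PySem.Dict.empty, PySem.Dict.empty)
  let res := en_dic_id.foldl (pvB_key idx) (PySem.Dict.empty, PySem.Dict.empty, PySem.Dict.empty)
  (res.1.items, res.2.1.items, res.2.2.items)

-- ===== PRECONDITION & SPEC =====
def Spec_exrtract_relation_in_types_entities (triple_entities : List (String × String × String)) (en_dic_id : List (String × List String)) (out : (List (String × List String)) × (List (String × List String)) × (List (String × List String))) : Prop := out = exrtract_relation_in_types_entities_alt triple_entities en_dic_id
instance (triple_entities : List (String × String × String)) (en_dic_id : List (String × List String)) (out : (List (String × List String)) × (List (String × List String)) × (List (String × List String))) : Decidable (Spec_exrtract_relation_in_types_entities triple_entities en_dic_id out) := by unfold Spec_exrtract_relation_in_types_entities; infer_instance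

-- ===== CLAIM (what is proved, stated in full; the proofs are below) =====
def Claim_equal_exrtract_relation_in_types_entities : Prop := ∀ (triple_entities : List (String × String × String)) (en_dic_id : List (String × List String)), Dom_exrtract_relation_in_types_entities triple_entities en_dic_id → Spec_exrtract_relation_in_types_entities triple_entities en_dic_id (exrtract_relation_in_types_entities triple_entities en_dic_id)

-- ===== LEMMAS AND PROOFS =====

-- set(xs) is empty exactly when xs is
theorem pv_ofList_eq_nil_iff {α : Type} [BEq α] [LawfulBEq α] (xs : List α) :
    PySem.Set.ofList xs = [] ↔ xs = [] := by
  constructor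
  · intro h
    cases xs with
    | nil => rfl
    | cons x t =>
      have hx : x ∈ PySem.Set.ofList (x :: t) := by
        rw [PySem.Set.mem_ofList]; exact List.mem_cons_self
      rw [h] at hx
      cases hx
  · intro h; subst h; rfl

-- updating with set(xs) is updating with xs
theorem pv_update_ofList {α : Type} [BEq α] [LawfulBEq α] (s : PySem.Set α) (xs : List α) :
    PySem.Set.update s (PySem.Set.ofList xs) = PySem.Set.update s xs := by
  rw [PySem.Set.update_eq_append_filter, PySem.Set.update_eq_append_filter, PySem.Set.ofList_ofList]

-- two chained modifies at the same key compose
theorem pv_modify_modify {κ ν : Type} [BEq κ] [LawfulBEq κ] (d : PySem.Dict κ ν) (k : κ) (d0 : ν) (f g : ν → ν) :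
    PySem.Dict.modify (PySem.Dict.modify d k d0 f) k d0 g = PySem.Dict.modify d k d0 (fun v => g (f v)) := by
  simp [PySem.Dict.modify, PySem.Dict.getD_insert_self, PySem.Dict.insert_insert_self]

-- a loop of single-element set-adds at one key is one update with the whole list
theorem pv_fold_add {α : Type} (M : List α) (r : α → String) (k : String)
    (d : PySem.Dict String (PySem.Set String)) :
    M.foldl (fun d x => pvBAdd d k (r x)) d
      = if M.isEmpty then d else PySem.Dict.modify d k [] (fun s => PySem.Set.update s (M.map r)) := by
  induction M generalizing d with
  | nil => rfl
  | cons x M ih =>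
    simp only [List.foldl_cons, List.isEmpty_cons, if_false, Bool.false_eq_true]
    rw [ih]
    cases M with
    | nil => simp [pvBAdd]
    | cons y M =>
      simp only [List.isEmpty_cons, if_false, Bool.false_eq_true, pvBAdd, pv_modify_modify]
      rfl

-- A's conditional dict-update on set(xs) is B's guarded modify
theorem pv_aupd_eq (d : PySem.Dict String (PySem.Set String)) (k : String) (xs : List String) :
    pvAUpd d k (PySem.Set.ofList xs)
      = if xs.isEmpty then d else PySem.Dict.modify d k [] (fun s => PySem.Set.update s xs) := by
  unfold pvAUpd
  cases xs with
  | nil => rfl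
  | cons x t =>
    have hne : PySem.Set.ofList (x :: t) ≠ [] := by
      intro h; exact absurd ((pv_ofList_eq_nil_iff (x :: t)).1 h) (by simp)
    rw [if_neg (by simpa using hne),
        if_neg (by simp)]
    unfold PySem.Dict.modify
    cases hg : d.get? k with
    | none =>
      have hD : d.getD k [] = [] := by rw [PySem.Dict.getD_eq_get?_getD, hg]; rfl
      simp only [hD]
      rfl
    | some s =>
      have hD : d.getD k [] = s := by rw [PySem.Dict.getD_eq_get?_getD, hg]; rfl
      simp only [hD]
      rw [pv_update_ofList]

-- a fold whose branches touch components 1 / 2.1 splits into two independent folds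
theorem pv_split12 {α D : Type} (L : List α) (p : α → Bool) (F G : D → α → D) (st : D × D × D) :
    L.foldl (fun st x => if p x then (F st.1 x, st.2.1, st.2.2) else (st.1, G st.2.1 x, st.2.2)) st
      = ((L.filter p).foldl F st.1, (L.filter (fun x => !p x)).foldl G st.2.1, st.2.2) := by
  induction L generalizing st with
  | nil => rfl
  | cons x L ih =>
    cases hp : p x <;> simp [List.foldl_cons, hp, ih]

-- the same for components 1 / 2.2
theorem pv_split13 {α D : Type} (L : List α) (p : α → Bool) (F G : D → α → D) (st : D × D × D) :
    L.foldl (fun st x => if p x then (F st.1 x, st.2.1, st.2.2) else (st.1, st.2.1, G st.2.2 x)) st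
      = ((L.filter p).foldl F st.1, st.2.1, (L.filter (fun x => !p x)).foldl G st.2.2) := by
  induction L generalizing st with
  | nil => rfl
  | cons x L ih =>
    cases hp : p x <;> simp [List.foldl_cons, hp, ih]

-- the subject index lists exactly the triples with the given subject, in order
theorem pv_idx_subj (te : List (String × String × String)) (en : String) :
    (te.foldl pvAddIncident (PySem.Dict.empty, PySem.Dict.empty)).1.getD en []
      = (te.filter (fun t => t.1 == en)).map (fun t => (t.2.1, t.2.2)) := by
  unfold pvAddIncident
  rw [PySem.List.foldl_prod_mk
    (f := fun d (t : String × String × String) => PySem.Dict.modify d t.1 [] (fun l => l ++ [(t.2.1, t.2.2)]))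
    (g := fun d (t : String × String × String) => PySem.Dict.modify d t.2.2 [] (fun l => l ++ [(t.2.1, t.1)]))]
  have : te.foldl (fun d (t : String × String × String) => PySem.Dict.modify d t.1 [] (fun l => l ++ [(t.2.1, t.2.2)])) PySem.Dict.empty
      = (te.map (fun t => (t.1, (t.2.1, t.2.2)))).foldl (fun d p => PySem.Dict.modify d p.1 [] (fun l => l ++ [p.2])) PySem.Dict.empty := by
    rw [List.foldl_map]
  rw [this, PySem.Dict.getD_foldl_modify_append, List.filter_map, List.map_map]
  simp [Function.comp_def]

-- the object index lists exactly the triples with the given object, in order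
theorem pv_idx_obj (te : List (String × String × String)) (en : String) :
    (te.foldl pvAddIncident (PySem.Dict.empty, PySem.Dict.empty)).2.getD en []
      = (te.filter (fun t => t.2.2 == en)).map (fun t => (t.2.1, t.1)) := by
  unfold pvAddIncident
  rw [PySem.List.foldl_prod_mk
    (f := fun d (t : String × String × String) => PySem.Dict.modify d t.1 [] (fun l => l ++ [(t.2.1, t.2.2)]))
    (g := fun d (t : String × String × String) => PySem.Dict.modify d t.2.2 [] (fun l => l ++ [(t.2.1, t.1)]))]
  have : te.foldl (fun d (t : String × String × String) => PySem.Dict.modify d t.2.2 [] (fun l => l ++ [(t.2.1, t.1)])) PySem.Dict.empty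
      = (te.map (fun t => (t.2.2, (t.2.1, t.1)))).foldl (fun d p => PySem.Dict.modify d p.1 [] (fun l => l ++ [p.2])) PySem.Dict.empty := by
    rw [List.foldl_map]
  rw [this, PySem.Dict.getD_foldl_modify_append, List.filter_map, List.map_map]
  simp [Function.comp_def]

-- membership in set(val) is membership in val
theorem pv_contains_ofList (val : List String) (x : String) :
    (PySem.Set.ofList val).contains x = val.contains x := by
  by_cases h : x ∈ val
  · rw [PySem.Set.contains_eq_listContains]
    simp [PySem.Set.mem_ofList, h]
  · rw [PySem.Set.contains_eq_listContains]
    simp [PySem.Set.mem_ofList, h]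

-- the per-entity steps of A and B agree
theorem pv_en_eq (te : List (String × String × String)) (key : String) (val : List String)
    (st : PySem.Dict String (PySem.Set String) × PySem.Dict String (PySem.Set String) × PySem.Dict String (PySem.Set String))
    (en : String) :
    pvA_en te key val st en
      = pvB_en (te.foldl pvAddIncident (PySem.Dict.empty, PySem.Dict.empty)) key (PySem.Set.ofList val) st en := by
  unfold pvB_en
  rw [pv_idx_subj, pv_idx_obj]
  rw [List.foldl_map, List.foldl_map]
  simp only [pv_contains_ofList]
  rw [pv_split12 (te.filter (fun t => t.1 == en)) (fun t => val.contains t.2.2)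
        (fun d t => pvBAdd d key t.2.1) (fun d t => pvBAdd d key t.2.1) st]
  rw [pv_split13 (te.filter (fun t => t.2.2 == en)) (fun t => val.contains t.1)
        (fun d t => pvBAdd d key t.2.1) (fun d t => pvBAdd d key t.2.1)]
  rw [List.filter_filter, List.filter_filter, List.filter_filter, List.filter_filter]
  simp only [pv_fold_add]
  unfold pvA_en
  simp only [pv_aupd_eq]
  have hc : ∀ (p q : (String × String × String) → Bool),
      te.filter (fun a => p a && q a) = te.filter (fun a => q a && p a) := by
    intro p q
    apply List.filter_congr
    intro a _
    exact Bool.and_comm (p a) (q a)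
  rw [hc (fun a => val.contains a.2.2) (fun a => a.1 == en),
      hc (fun a => !val.contains a.2.2) (fun a => a.1 == en),
      hc (fun a => val.contains a.1) (fun a => a.2.2 == en),
      hc (fun a => !val.contains a.1) (fun a => a.2.2 == en)]
  simp only [List.isEmpty_map, List.contains_eq_mem]

theorem exrtract_relation_in_types_entities_spec : Claim_equal_exrtract_relation_in_types_entities := by
  intro te endic _
  unfold Spec_exrtract_relation_in_types_entities
  unfold exrtract_relation_in_types_entities exrtract_relation_in_types_entities_alt
  have h : pvA_key te = pvB_key (te.foldl pvAddIncident (PySem.Dict.empty, PySem.Dict.empty)) := by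
    funext st kv
    unfold pvA_key pvB_key
    rw [show pvA_en te kv.1 kv.2
        = pvB_en (te.foldl pvAddIncident (PySem.Dict.empty, PySem.Dict.empty)) kv.1 (PySem.Set.ofList kv.2)
      from funext fun st => funext fun en => pv_en_eq te kv.1 kv.2 st en]
  rw [h]
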